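-- pv_equiv track=rewrite | github.com/mpichler94/advent-of-code | 2021/day14/solve.py | process_polymer
-- ===== SOURCE A (Python) =====
-- from functools import lru_cache
-- from collections import Counter
--
-- def process_polymer(template, rules, iterations):
--     @lru_cache(maxsize=None)    # caches inputs and outputs to skip repeating function calls
--     def replace_and_count(pair, iteration):
--         if iteration >= iterations:
--             return Counter()
--         pair1 = pair[0] + rules[pair]
--         pair2 = rules[pair] + pair[1]
--         counter = Counter(list(rules[pair]))
--         counter.update(replace_and_count(pair1, iteration + 1))
--         counter.update(replace_and_count(pair2, iteration + 1))
--         return counter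
--
--     counter = Counter(list(template))
--     for i in range(len(template) - 1):
--         counter.update(replace_and_count(template[i:i + 2], 0))
--     return counter
-- ===== SOURCE B (Python) =====
-- from collections import Counter
--
--
-- def process_polymer(template, rules, iterations):
--     result = Counter(list(template))
--     if len(template) < 2 or iterations <= 0:
--         return result
--     pair_keys = list(rules)
--     # counts[p] = Counter of the characters inserted when expanding pair p
--     # for the remaining number of rounds; built bottom-up, one level at a time.
--     counts = {p: Counter() for p in pair_keys}
--     for _ in range(iterations):
--         prev = counts
--         counts = {}
--         for p in pair_keys:
--             c = rules[p]
--             cnt = Counter(list(c))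
--             cnt.update(prev[p[0] + c])
--             cnt.update(prev[c + p[1]])
--             counts[p] = cnt
--     for i in range(len(template) - 1):
--         result.update(counts[template[i:i + 2]])
--     return result
-- ===== Notes on version B (the rewrite author's own statement) =====
-- stated objective: alternative
-- what changed: replaces A's top-down memoized recursion over (pair, iteration) with an iterative bottom-up dynamic program: a table mapping every rule pair to the Counter of characters its expansion inserts, rebuilt level by level for `iterations` rounds and then merged over the template's adjacent pairs
-- outside the precondition, e.g. on process_polymer('AB', {'AB': 'C'}, 1): A returns {'A': 1, 'B': 1, 'C': 1}, B raises KeyError; on process_polymer('AB', {'AB': ''}, 1): A returns {'A': 1, 'B': 1}, B raises KeyError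
import Mathlib
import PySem

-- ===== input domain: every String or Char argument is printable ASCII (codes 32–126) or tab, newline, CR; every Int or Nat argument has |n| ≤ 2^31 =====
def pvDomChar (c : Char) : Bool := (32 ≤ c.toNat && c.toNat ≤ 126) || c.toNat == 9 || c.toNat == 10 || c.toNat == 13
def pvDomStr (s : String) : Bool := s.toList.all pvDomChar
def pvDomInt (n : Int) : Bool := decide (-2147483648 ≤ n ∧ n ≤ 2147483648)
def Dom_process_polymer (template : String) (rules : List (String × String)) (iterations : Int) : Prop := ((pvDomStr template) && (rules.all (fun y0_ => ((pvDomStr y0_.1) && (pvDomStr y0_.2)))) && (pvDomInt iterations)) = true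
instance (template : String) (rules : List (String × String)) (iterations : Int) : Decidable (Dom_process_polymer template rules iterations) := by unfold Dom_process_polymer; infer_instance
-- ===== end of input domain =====

-- B replaces A's top-down memoized recursion by a bottom-up per-pair table iterated
-- level by level (objective: alternative; same asymptotic cost).

-- ===== PORT A =====
-- Counter(list(s)) : a Counter keyed by the 1-character strings of s (shared by both ports)
def pvCounterStr (s : String) : PySem.Dict String Int :=
  PySem.Dict.counter (s.toList.map (fun c => String.ofList [c]))

-- counter.update(other) for Counters (shared by both ports)
def pvCUpdate (d other : PySem.Dict String Int) : PySem.Dict String Int :=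
  other.items.foldl (fun acc p => acc.insert p.1 (acc.getD p.1 0 + p.2)) d

-- replace_and_count(pair, iteration); rules[pair] / pair[0] / pair[1] raise outside
-- Pre_process_polymer, there the port totalizes them with a default ("" / '?')
def pvRcA (rd : PySem.Dict String String) (iterations : Int) (pair : String) (iteration : Int) :
    PySem.Dict String Int :=
  if _h : iterations ≤ iteration then PySem.Dict.empty
  else
    let v := (rd.get? pair).getD ""
    let pair1 := String.ofList ([(PySem.Str.pyGet? pair 0).getD '?'] ++ v.toList)
    let pair2 := String.ofList (v.toList ++ [(PySem.Str.pyGet? pair 1).getD '?'])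
    let counter := pvCounterStr v
    let counter := pvCUpdate counter (pvRcA rd iterations pair1 (iteration + 1))
    pvCUpdate counter (pvRcA rd iterations pair2 (iteration + 1))
termination_by (iterations - iteration).toNat
decreasing_by all_goals omega

def process_polymer (template : String) (rules : List (String × String)) (iterations : Int) :
    List (String × Int) :=
  let rd := PySem.Dict.ofList rules
  let counter := pvCounterStr template
  ((PySem.List.pyRange 0 ((template.toList.length : Int) - 1) 1).foldl
      (fun c i =>
        pvCUpdate c (pvRcA rd iterations (PySem.Str.slice template (some i) (some (i + 2))) 0))
      counter).items

-- ===== PORT B =====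
-- body of Source B's inner `for p in pair_keys` loop: the new Counter for pair p
def pvCellB (rd : PySem.Dict String String) (prev : PySem.Dict String (PySem.Dict String Int))
    (p : String) : PySem.Dict String Int :=
  let c := (rd.get? p).getD ""
  let cnt := pvCounterStr c
  let cnt := pvCUpdate cnt
    (prev.getD (String.ofList ([(PySem.Str.pyGet? p 0).getD '?'] ++ c.toList)) PySem.Dict.empty)
  pvCUpdate cnt
    (prev.getD (String.ofList (c.toList ++ [(PySem.Str.pyGet? p 1).getD '?'])) PySem.Dict.empty)

-- one round of Source B's `for _ in range(iterations)` loop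
def pvStepB (rd : PySem.Dict String String) (pairKeys : List String)
    (prev : PySem.Dict String (PySem.Dict String Int)) :
    PySem.Dict String (PySem.Dict String Int) :=
  pairKeys.foldl (fun acc p => acc.insert p (pvCellB rd prev p)) PySem.Dict.empty

def process_polymer_alt (template : String) (rules : List (String × String)) (iterations : Int) :
    List (String × Int) :=
  let result := pvCounterStr template
  if template.toList.length < 2 ∨ iterations ≤ 0 then result.items
  else
    let rd := PySem.Dict.ofList rules
    let pairKeys := rd.keys
    let init := pairKeys.foldl
      (fun acc p => acc.insert p (PySem.Dict.empty : PySem.Dict String Int)) PySem.Dict.empty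
    let counts := (PySem.List.pyRange 0 iterations 1).foldl (fun prev _ => pvStepB rd pairKeys prev) init
    ((PySem.List.pyRange 0 ((template.toList.length : Int) - 1) 1).foldl
        (fun c i =>
          pvCUpdate c (counts.getD (PySem.Str.slice template (some i) (some (i + 2))) PySem.Dict.empty))
        result).items

-- ===== PRECONDITION & SPEC =====
-- the characters occurring in the template or in any rule key or value, first occurrences in order
def pvAlpha (template : String) (rules : List (String × String)) : List Char :=
  PySem.Set.ofList (template.toList ++ rules.flatMap (fun r => r.1.toList ++ r.2.toList))

-- Pre_ restricts rules to the task's natural shape (distinct 2-character keys, 1-character values,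
-- a rule for every pair over the occurring characters — on other shapes A may return but B raises
-- KeyError) and caps iterations at 400 because A's recursion, one frame per iteration, hits
-- Python's recursion limit (RecursionError at ≈500 with the default limit); templates shorter
-- than 2 characters and non-positive iteration counts never recurse and are always admitted.
def Pre_process_polymer (template : String) (rules : List (String × String)) (iterations : Int) : Prop :=
  iterations ≤ 0 ∨ template.toList.length < 2 ∨
    (iterations ≤ 400 ∧ (rules.map Prod.fst).Nodup ∧
      (∀ r ∈ rules, r.1.toList.length = 2 ∧ r.2.toList.length = 1) ∧
      ((pvAlpha template rules).all (fun c => (pvAlpha template rules).all (fun d =>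
        rules.any (fun rr => rr.1.toList == [c, d]))) = true))
instance (template : String) (rules : List (String × String)) (iterations : Int) :
    Decidable (Pre_process_polymer template rules iterations) := by
  unfold Pre_process_polymer; infer_instance

def pvWitness_process_polymer : String × (List (String × String)) × Int :=
  ("NN", [("NN", "C"), ("NC", "N"), ("CN", "C"), ("CC", "N")], 2)

def Spec_process_polymer (template : String) (rules : List (String × String)) (iterations : Int) (out : List (String × Int)) : Prop := out = process_polymer_alt template rules iterations
instance (template : String) (rules : List (String × String)) (iterations : Int) (out : List (String × Int)) : Decidable (Spec_process_polymer template rules iterations out) := by unfold Spec_process_polymer; infer_instance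

-- ===== CLAIM (what is proved, stated in full; the proofs are below) =====
def Claim_equal_process_polymer : Prop := ∀ (template : String) (rules : List (String × String)) (iterations : Int), Dom_process_polymer template rules iterations → Pre_process_polymer template rules iterations → Spec_process_polymer template rules iterations (process_polymer template rules iterations)

-- ===== LEMMAS AND PROOFS =====

theorem pvWitness_ok :
    Dom_process_polymer pvWitness_process_polymer.1 pvWitness_process_polymer.2.1
        pvWitness_process_polymer.2.2 ∧
      Pre_process_polymer pvWitness_process_polymer.1 pvWitness_process_polymer.2.1
        pvWitness_process_polymer.2.2 := by
  constructor <;> decide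

theorem pvCUpdate_empty (d : PySem.Dict String Int) : pvCUpdate d PySem.Dict.empty = d := rfl

theorem pvFoldlConst {α β : Type} (l : List α) (b : β) : l.foldl (fun c _ => c) b = b := by
  induction l generalizing b <;> simp [List.foldl_cons, *]

theorem pvFoldlIter {α β : Type} (l : List α) (f : β → β) (b : β) :
    l.foldl (fun x _ => f x) b = f^[l.length] b := by
  induction l generalizing b with
  | nil => rfl
  | cons a l ih => simp [List.foldl_cons, ih, Function.iterate_succ_apply]

theorem pvGetDFoldlInsert {ν : Type} (l : List String) (g : String → ν)
    (d : PySem.Dict String ν) (q : String) (d0 : ν) :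
    (l.foldl (fun acc x => acc.insert x (g x)) d).getD q d0 =
      if q ∈ l then g q else d.getD q d0 := by
  induction l generalizing d with
  | nil => simp
  | cons a l ih =>
    rw [List.foldl_cons, ih]
    by_cases hql : q ∈ l
    · simp [hql]
    · by_cases hqa : q = a
      · subst hqa; simp [hql, PySem.Dict.getD_insert_self]
      · simp [hql, hqa, PySem.Dict.getD_insert_of_ne _ _ _ hqa]

theorem pvItems_ofList (rules : List (String × String)) (hnd : (rules.map Prod.fst).Nodup) :
    (PySem.Dict.ofList rules).items = rules := by
  have h := PySem.Dict.items_foldl_insert_fresh rules Prod.fst Prod.snd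
    (PySem.Dict.empty : PySem.Dict String String)
    (fun a _ => PySem.Dict.contains_empty _) hnd
  simpa [PySem.Dict.ofList, PySem.Dict.update] using h

theorem pvGet?_ofList (rules : List (String × String)) (hnd : (rules.map Prod.fst).Nodup)
    {r : String × String} (hr : r ∈ rules) : (PySem.Dict.ofList rules).get? r.1 = some r.2 := by
  apply PySem.Dict.get?_of_mem_items
  · rw [pvItems_ofList rules hnd]; simpa using hr
  · simpa [PySem.Dict.keys, pvItems_ofList rules hnd] using hnd

theorem pvKeys_ofList (rules : List (String × String)) (hnd : (rules.map Prod.fst).Nodup) :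
    (PySem.Dict.ofList rules).keys = rules.map Prod.fst := by
  simp [PySem.Dict.keys, pvItems_ofList rules hnd]

theorem pvPyGet0 (c d : Char) : PySem.Str.pyGet? (String.ofList [c, d]) 0 = some c := by
  simp [pysem, PySem.List.pyGet?, PySem.List.pyIdx?]

theorem pvPyGet1 (c d : Char) : PySem.Str.pyGet? (String.ofList [c, d]) 1 = some d := by
  simp [pysem, PySem.List.pyGet?, PySem.List.pyIdx?]

theorem pvPyRangeNonpos (x : Int) (hx : x ≤ 0) : PySem.List.pyRange 0 x 1 = [] := by
  rw [List.eq_nil_iff_forall_not_mem]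
  intro a ha
  have := PySem.List.mem_pyRange_one.mp ha
  omega

theorem pvSliceTwo (t : List Char) (k : Nat) (hk : k + 1 < t.length) :
    PySem.List.slice t (some (k : Int)) (some ((k : Int) + 2)) = [t[k], t[k + 1]] := by
  have h2 : ((k : Int) + 2) = ((k + 2 : Nat) : Int) := by push_cast; ring
  rw [h2, PySem.List.slice_natCast]
  have h3 : k + 2 - k = 2 := by omega
  rw [h3, List.drop_eq_getElem_cons (show k < t.length by omega),
    List.drop_eq_getElem_cons (show k + 1 < t.length from hk)]
  rfl

-- a rule exists for every pair of alphabet characters, in a usable form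
theorem pvRuleFor (template : String) (rules : List (String × String))
    (hshape : ∀ r ∈ rules, r.1.toList.length = 2 ∧ r.2.toList.length = 1)
    (htot : (pvAlpha template rules).all (fun c => (pvAlpha template rules).all (fun d =>
      rules.any (fun rr => rr.1.toList == [c, d]))) = true)
    {c d : Char} (hc : c ∈ pvAlpha template rules) (hd : d ∈ pvAlpha template rules) :
    ∃ r ∈ rules, r.1 = String.ofList [c, d] ∧ ∃ e, r.2.toList = [e] ∧
      e ∈ pvAlpha template rules := by
  simp only [List.all_eq_true, List.any_eq_true, beq_iff_eq] at htot
  obtain ⟨r, hr, hr1⟩ := htot c hc d hd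
  obtain ⟨e, he⟩ : ∃ e, r.2.toList = [e] := by
    have h1 := (hshape r hr).2
    rcases hl : r.2.toList with _ | ⟨a, _ | ⟨b, t⟩⟩ <;> rw [hl] at h1 <;> simp at h1
    exact ⟨a, rfl⟩
  refine ⟨r, hr, ?_, e, he, ?_⟩
  · apply String.toList_inj.mp; simp [hr1]
  · unfold pvAlpha
    rw [PySem.Set.mem_ofList]
    refine List.mem_append_right _ (List.mem_flatMap.mpr ⟨r, hr, ?_⟩)
    exact List.mem_append_right _ (by simp [he])

theorem pvMain (template : String) (rules : List (String × String)) (iterations : Int)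
    (hnd : (rules.map Prod.fst).Nodup)
    (hshape : ∀ r ∈ rules, r.1.toList.length = 2 ∧ r.2.toList.length = 1)
    (htot : (pvAlpha template rules).all (fun c => (pvAlpha template rules).all (fun d =>
      rules.any (fun rr => rr.1.toList == [c, d]))) = true)
    (k : Nat) (hk : (k : Int) ≤ iterations)
    (c d : Char) (hc : c ∈ pvAlpha template rules) (hd : d ∈ pvAlpha template rules) :
    ((pvStepB (PySem.Dict.ofList rules) (PySem.Dict.ofList rules).keys)^[k]
        ((PySem.Dict.ofList rules).keys.foldl
          (fun acc p => acc.insert p (PySem.Dict.empty : PySem.Dict String Int))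
          PySem.Dict.empty)).getD (String.ofList [c, d]) PySem.Dict.empty =
      pvRcA (PySem.Dict.ofList rules) iterations (String.ofList [c, d]) (iterations - k) := by
  induction k generalizing c d with
  | zero =>
    rw [Function.iterate_zero_apply, pvGetDFoldlInsert, pvRcA]
    rw [dif_pos (by omega : iterations ≤ iterations - ((0 : Nat) : Int))]
    split <;> simp [PySem.Dict.getD_empty]
  | succ k ih =>
    have hk' : (k : Int) ≤ iterations := by push_cast at hk ⊢; omega
    obtain ⟨r, hr, hr1, e, he, heA⟩ := pvRuleFor template rules hshape htot hc hd
    have hget : (PySem.Dict.ofList rules).get? (String.ofList [c, d]) = some r.2 := by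
      rw [← hr1]; exact pvGet?_ofList rules hnd hr
    have hkey : String.ofList [c, d] ∈ (PySem.Dict.ofList rules).keys := by
      rw [pvKeys_ofList rules hnd, ← hr1]
      exact List.mem_map_of_mem hr
    rw [Function.iterate_succ_apply', pvStepB, pvGetDFoldlInsert, if_pos hkey, pvCellB]
    simp only [hget, Option.getD_some, pvPyGet0, pvPyGet1, he, List.singleton_append]
    rw [ih hk' c e hc heA, ih hk' e d heA hd]
    have harg : iterations - ((k + 1 : Nat) : Int) + 1 = iterations - (k : Nat) := by
      push_cast; omega
    conv_rhs => rw [pvRcA]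
    rw [dif_neg (by push_cast; omega : ¬ iterations ≤ iterations - ((k + 1 : Nat) : Int))]
    simp only [hget, Option.getD_some, pvPyGet0, pvPyGet1, he, List.singleton_append, harg]

-- ===== VERDICT (by name: the statement is the Claim_ definition above) =====
theorem pvRcA_stop (rd : PySem.Dict String String) (iterations : Int) (pair : String)
    (iteration : Int) (h : iterations ≤ iteration) :
    pvRcA rd iterations pair iteration = PySem.Dict.empty := by
  rw [pvRcA]; exact dif_pos h

-- ===== VERDICT (by name: the statement is the Claim_ definition above) =====
theorem process_polymer_spec : Claim_equal_process_polymer := by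
  intro template rules iterations _hdom hpre
  unfold Spec_process_polymer
  unfold process_polymer process_polymer_alt
  dsimp only
  by_cases hit : iterations ≤ 0
  · rw [if_pos (Or.inr hit)]
    congr 1
    rw [PySem.List.foldl_congr_mem _ _ (fun c _ => c) _
      (fun acc x _ => by rw [pvRcA_stop _ _ _ _ hit, pvCUpdate_empty])]
    exact pvFoldlConst _ _
  · by_cases hlen : template.toList.length < 2
    · rw [if_pos (Or.inl hlen)]
      rw [pvPyRangeNonpos _ (by omega)]
      rfl
    · obtain ⟨hcap, hnd, hshape, htot⟩ :
        iterations ≤ 400 ∧ (rules.map Prod.fst).Nodup ∧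
          (∀ r ∈ rules, r.1.toList.length = 2 ∧ r.2.toList.length = 1) ∧
          ((pvAlpha template rules).all (fun c => (pvAlpha template rules).all (fun d =>
            rules.any (fun rr => rr.1.toList == [c, d]))) = true) := by
        rcases hpre with h | h | h
        · exact absurd h hit
        · exact absurd h hlen
        · exact h
      rw [if_neg (by omega : ¬ (template.toList.length < 2 ∨ iterations ≤ 0))]
      congr 1
      apply PySem.List.foldl_congr_mem
      intro acc i hi
      obtain ⟨hi0, hi1⟩ := PySem.List.mem_pyRange_one.mp hi
      congr 1
      have hkdef : i = ((i.toNat : Nat) : Int) := by omega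
      have hklt : i.toNat + 1 < template.toList.length := by omega
      have hslice : PySem.Str.slice template (some i) (some (i + 2)) =
          String.ofList [template.toList[i.toNat], template.toList[i.toNat + 1]] := by
        apply String.toList_inj.mp
        rw [PySem.Str.toList_slice, PySem.Chars.slice_eq_listSlice]
        conv_lhs => rw [hkdef]
        rw [pvSliceTwo template.toList i.toNat hklt]
        simp
      rw [hslice]
      have hmemA : ∀ j : Nat, (hj : j < template.toList.length) →
          template.toList[j] ∈ pvAlpha template rules := by
        intro j hj
        unfold pvAlpha
        rw [PySem.Set.mem_ofList]
        exact List.mem_append_left _ (List.getElem_mem hj)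
      have hN : iterations = ((iterations.toNat : Nat) : Int) := by omega
      have hmain := pvMain template rules iterations hnd hshape htot iterations.toNat
        (by omega) template.toList[i.toNat] template.toList[i.toNat + 1]
        (hmemA i.toNat (by omega)) (hmemA (i.toNat + 1) hklt)
      rw [(by omega : iterations - ((iterations.toNat : Nat) : Int) = 0)] at hmain
      rw [← hmain]
      conv_rhs => rw [hN, PySem.List.pyRange_zero_natCast]
      rw [pvFoldlIter, List.length_map, List.length_range]
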